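-- pv_equiv track=rewrite | github.com/susiebeep/Software-Engineering-II | Function 2 for GP/task_refactored.py | my_datetime_months
-- ===== SOURCE A (Python) =====
-- year = 1970
--
-- month = 1
--
-- day = 1
--
-- def my_datetime_months(year_count, num_days):
--     leap_days = [31, 29, 31, 30, 31, 30, 31, 31, 30, 31, 30, 31]
--     days_list = [31, 28, 31, 30, 31, 30, 31, 31, 30, 31, 30, 31]
--     month_count = 0
--     if int(year + year_count) % 4 == 0:
--         if int(year + year_count) % 100 == 0:
--             if int(year + year_count) % 400 == 0:
--                 days_list = leap_days
--         else:
--             days_list = leap_days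
--
--     for day1 in days_list:
--         if num_days - day1 >= 0:
--             num_days -= day1
--             month_count += 1
--         else:
--             break
--     result = str(int(month + int(month_count))).zfill(2) + "-" + str(
--         int(day + num_days)).zfill(2) + "-" + str(
--             int(year + year_count))
--     return result
-- ===== SOURCE B (Python) =====
-- year = 1970
--
-- month = 1
--
-- day = 1
--
-- def my_datetime_months(year_count, num_days):
--     y = year + year_count
--     leap = y % 4 == 0 and (y % 100 != 0 or y % 400 == 0)
--     days = [31, 29 if leap else 28, 31, 30, 31, 30, 31, 31, 30, 31, 30, 31]
--
--     def consume(months, n):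
--         # divide and conquer: consume whole halves of the month list at a time
--         if len(months) <= 1:
--             if months and n >= months[0]:
--                 return n - months[0], 1
--             return n, 0
--         k = len(months) // 2
--         left_total = sum(months[:k])
--         if n >= left_total:
--             r, c = consume(months[k:], n - left_total)
--             return r, k + c
--         return consume(months[:k], n)
--
--     rem, cnt = consume(days, num_days)
--     return str(month + cnt).zfill(2) + "-" + str(day + rem).zfill(2) + "-" + str(y)
-- ===== Notes on version B (the rewrite author's own statement) =====
-- stated objective: alternative
-- what changed: Replaces A's linear subtract-and-break loop over the 12 month lengths by a recursive divide-and-conquer descent that sums and consumes whole halves of the month list at a time (binary-search style), with the leap test as one boolean expression instead of nested ifs.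
import Mathlib
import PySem

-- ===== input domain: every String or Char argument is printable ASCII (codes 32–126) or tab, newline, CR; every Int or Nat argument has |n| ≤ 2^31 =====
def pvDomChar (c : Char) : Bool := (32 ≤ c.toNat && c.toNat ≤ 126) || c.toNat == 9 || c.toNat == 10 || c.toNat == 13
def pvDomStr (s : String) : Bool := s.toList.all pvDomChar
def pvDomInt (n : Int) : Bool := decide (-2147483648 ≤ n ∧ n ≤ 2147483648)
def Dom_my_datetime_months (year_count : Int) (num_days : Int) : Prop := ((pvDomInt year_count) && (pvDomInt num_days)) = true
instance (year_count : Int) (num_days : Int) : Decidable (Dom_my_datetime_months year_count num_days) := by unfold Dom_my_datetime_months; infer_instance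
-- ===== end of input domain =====

-- B replaces A's linear subtract-and-break month loop by a recursive divide-and-conquer
-- descent that consumes whole halves of the month list at a time (and one boolean leap
-- test instead of nested ifs); same output format. Objective: alternative algorithm.


-- ===== PORT A =====
-- A's 'for day1 in days_list: … else: break' loop, state (num_days, month_count)
def pvLoopA : List Int → Int → Int → Int × Int
  | [], n, m => (n, m)
  | d :: ds, n, m => if n - d ≥ 0 then pvLoopA ds (n - d) (m + 1) else (n, m)

def my_datetime_months (year_count : Int) (num_days : Int) : String :=
  let leap_days : List Int := [31, 29, 31, 30, 31, 30, 31, 31, 30, 31, 30, 31]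
  let days_list0 : List Int := [31, 28, 31, 30, 31, 30, 31, 31, 30, 31, 30, 31]
  let days_list : List Int :=
    if PySem.Int.mod (1970 + year_count) 4 = 0 then
      if PySem.Int.mod (1970 + year_count) 100 = 0 then
        if PySem.Int.mod (1970 + year_count) 400 = 0 then leap_days else days_list0
      else leap_days
    else days_list0
  let r := pvLoopA days_list num_days 0
  PySem.Str.zfill (PySem.Int.toStr (1 + r.2)) 2 ++ "-" ++
    PySem.Str.zfill (PySem.Int.toStr (1 + r.1)) 2 ++ "-" ++
    PySem.Int.toStr (1970 + year_count)

-- ===== PORT B =====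
-- Source B's recursive 'consume': binary-search descent that swallows whole halves at a time
def pvConsume : List Int → Int → Int × Int
  | [], n => (n, 0)
  | [d], n => if n ≥ d then (n - d, 1) else (n, 0)
  | m1 :: m2 :: rest, n =>
    let k := (m1 :: m2 :: rest).length / 2
    let lt := ((m1 :: m2 :: rest).take k).sum
    if n ≥ lt then
      let rc := pvConsume ((m1 :: m2 :: rest).drop k) (n - lt)
      (rc.1, (k : Int) + rc.2)
    else pvConsume ((m1 :: m2 :: rest).take k) n
termination_by ms _ => ms.length
decreasing_by all_goals simp; omega

def my_datetime_months_alt (year_count : Int) (num_days : Int) : String :=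
  let y := 1970 + year_count
  let leap : Bool := PySem.Int.mod y 4 == 0 && (!(PySem.Int.mod y 100 == 0) || PySem.Int.mod y 400 == 0)
  let days : List Int := [31, if leap then 29 else 28, 31, 30, 31, 30, 31, 31, 30, 31, 30, 31]
  let rc := pvConsume days num_days
  PySem.Str.zfill (PySem.Int.toStr (1 + rc.2)) 2 ++ "-" ++
    PySem.Str.zfill (PySem.Int.toStr (1 + rc.1)) 2 ++ "-" ++
    PySem.Int.toStr y

-- ===== PRECONDITION & SPEC =====
def Spec_my_datetime_months (year_count : Int) (num_days : Int) (out : String) : Prop := out = my_datetime_months_alt year_count num_days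
instance (year_count : Int) (num_days : Int) (out : String) : Decidable (Spec_my_datetime_months year_count num_days out) := by unfold Spec_my_datetime_months; infer_instance

-- ===== CLAIM (what is proved, stated in full; the proofs are below) =====
def Claim_equal_my_datetime_months : Prop := ∀ (year_count : Int) (num_days : Int), Dom_my_datetime_months year_count num_days → Spec_my_datetime_months year_count num_days (my_datetime_months year_count num_days)

-- ===== LEMMAS AND PROOFS =====

theorem pvLoopA_shift (ds : List Int) : ∀ (n m : Int),
    pvLoopA ds n m = ((pvLoopA ds n 0).1, m + (pvLoopA ds n 0).2) := by
  induction ds with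
  | nil => intro n m; simp [pvLoopA]
  | cons d ds ih =>
    intro n m
    simp only [pvLoopA]
    by_cases h : n - d ≥ 0
    · rw [if_pos h, if_pos h, ih (n - d) (m + 1), ih (n - d) (0 + 1)]
      simp [Prod.ext_iff]; ring
    · rw [if_neg h, if_neg h]; simp

-- if the whole left block fits, A's loop consumes it entirely
theorem pvLoopA_append_ge (L : List Int) : ∀ (R : List Int) (n : Int),
    (∀ d ∈ L, 0 < d) → L.sum ≤ n →
    pvLoopA (L ++ R) n 0
      = ((pvLoopA R (n - L.sum) 0).1, (L.length : Int) + (pvLoopA R (n - L.sum) 0).2) := by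
  induction L with
  | nil =>
    intro R n _ _
    simp only [List.nil_append, List.sum_nil, List.length_nil, Int.sub_zero, Nat.cast_zero]
    exact pvLoopA_shift R n 0
  | cons d L ih =>
    intro R n hpos hsum
    have hLsum : 0 ≤ L.sum := List.sum_nonneg (fun x hx => le_of_lt (hpos x (by simp [hx])))
    have hd : 0 < d := hpos d (by simp)
    simp only [List.sum_cons] at hsum
    have h : n - d ≥ 0 := by omega
    simp only [List.cons_append, pvLoopA, if_pos h]
    rw [pvLoopA_shift, ih R (n - d) (fun x hx => hpos x (by simp [hx])) (by omega)]
    have harg : n - d - L.sum = n - (d :: L).sum := by simp only [List.sum_cons]; ring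
    rw [harg]
    simp only [Prod.mk.injEq, List.length_cons, true_and]
    push_cast; ring

-- if the left block does not fit, the loop never reaches R
theorem pvLoopA_append_lt (L : List Int) : ∀ (R : List Int) (n : Int),
    (∀ d ∈ L ++ R, 0 < d) → n < L.sum →
    pvLoopA (L ++ R) n 0 = pvLoopA L n 0 := by
  induction L with
  | nil =>
    intro R n hpos hn
    simp only [List.sum_nil] at hn
    cases R with
    | nil => simp
    | cons d R =>
      have hd : 0 < d := hpos d (by simp)
      simp only [List.nil_append, pvLoopA]
      rw [if_neg (by omega)]
  | cons d L ih =>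
    intro R n hpos hn
    simp only [List.sum_cons] at hn
    simp only [List.cons_append, pvLoopA]
    by_cases h : n - d ≥ 0
    · rw [if_pos h, if_pos h, pvLoopA_shift, pvLoopA_shift L,
          ih R (n - d) (fun x hx => hpos x (by simp at hx ⊢; tauto)) (by omega)]
    · rw [if_neg h, if_neg h]

-- core equivalence: B's divide-and-conquer descent computes A's loop result
theorem pvConsume_eq (N : Nat) : ∀ (ms : List Int) (n : Int), ms.length ≤ N →
    (∀ d ∈ ms, 0 < d) → pvConsume ms n = pvLoopA ms n 0 := by
  induction N with
  | zero =>
    intro ms n hlen _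
    have : ms = [] := List.length_eq_zero_iff.mp (Nat.le_zero.mp hlen)
    subst this; simp [pvConsume, pvLoopA]
  | succ N ih =>
    intro ms n hlen hpos
    match ms with
    | [] => simp [pvConsume, pvLoopA]
    | [d] =>
      simp only [pvConsume, pvLoopA]
      by_cases h : n - d ≥ 0
      · rw [if_pos h, if_pos (show n ≥ d by omega)]; norm_num
      · rw [if_neg h, if_neg (show ¬ n ≥ d by omega)]
    | m1 :: m2 :: rest =>
      rw [pvConsume]
      have hlen2 : (m1 :: m2 :: rest).length = rest.length + 2 := by simp
      set ms := m1 :: m2 :: rest with hms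
      set k := ms.length / 2 with hk
      have hk1 : 1 ≤ k := by omega
      have hkl : k < ms.length := by omega
      have hsplit : ms.take k ++ ms.drop k = ms := List.take_append_drop k ms
      have htl : (ms.take k).length = k := by
        rw [List.length_take]; omega
      have hdl : (ms.drop k).length = ms.length - k := by simp
      have hposT : ∀ d ∈ ms.take k, 0 < d := fun d hd => hpos d (List.mem_of_mem_take hd)
      have hposD : ∀ d ∈ ms.drop k, 0 < d := fun d hd => hpos d (List.mem_of_mem_drop hd)
      by_cases h : n ≥ (ms.take k).sum
      · rw [if_pos h]
        rw [ih (ms.drop k) (n - (ms.take k).sum) (by omega) hposD]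
        rw [show pvLoopA ms n 0 = pvLoopA (ms.take k ++ ms.drop k) n 0 by rw [hsplit]]
        rw [pvLoopA_append_ge (ms.take k) (ms.drop k) n hposT h]
        rw [htl]
      · rw [if_neg h]
        rw [ih (ms.take k) n (by omega) hposT]
        rw [show pvLoopA ms n 0 = pvLoopA (ms.take k ++ ms.drop k) n 0 by rw [hsplit]]
        rw [pvLoopA_append_lt (ms.take k) (ms.drop k) n (by rw [hsplit]; exact hpos) (by omega)]

-- the two leap-year selections pick the same month list
theorem pvDays_eq (y : Int) :
    (if PySem.Int.mod y 4 = 0 then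
       if PySem.Int.mod y 100 = 0 then
         if PySem.Int.mod y 400 = 0 then
           ([31, 29, 31, 30, 31, 30, 31, 31, 30, 31, 30, 31] : List Int)
         else [31, 28, 31, 30, 31, 30, 31, 31, 30, 31, 30, 31]
       else [31, 29, 31, 30, 31, 30, 31, 31, 30, 31, 30, 31]
     else [31, 28, 31, 30, 31, 30, 31, 31, 30, 31, 30, 31])
    = [31, if (PySem.Int.mod y 4 == 0 && (!(PySem.Int.mod y 100 == 0) || PySem.Int.mod y 400 == 0))
           then (29 : Int) else 28, 31, 30, 31, 30, 31, 31, 30, 31, 30, 31] := by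
  simp only [PySem.Int.mod_eq_zero_iff_dvd]
  by_cases h4 : (4:Int) ∣ y <;>
  by_cases h100 : (100:Int) ∣ y <;>
  by_cases h400 : (400:Int) ∣ y <;>
  simp [h4, h100, h400]

-- ===== VERDICT (by name: the statement is the Claim_ definition above) =====
theorem my_datetime_months_spec : Claim_equal_my_datetime_months := by
  intro year_count num_days _
  unfold Spec_my_datetime_months my_datetime_months my_datetime_months_alt
  simp only []
  rw [pvDays_eq (1970 + year_count)]
  have hpos : ∀ d ∈ ([31, if (PySem.Int.mod (1970 + year_count) 4 == 0 &&
        (!(PySem.Int.mod (1970 + year_count) 100 == 0) || PySem.Int.mod (1970 + year_count) 400 == 0))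
        then (29 : Int) else 28, 31, 30, 31, 30, 31, 31, 30, 31, 30, 31] : List Int), 0 < d := by
    split <;> decide
  rw [pvConsume_eq 12 _ num_days (by split <;> decide) hpos]
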